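-- pv_equiv track=rewrite | github.com/victoriest/deep-learning-playgroud | chinese_recognize/ocr_split_text_line.py | get_black_steps_list
-- ===== SOURCE A (Python) =====
-- def get_black_steps_list(param):
--     lst = []
--     if len(param) is 0:
--         return lst
--     black = False
--     for i in range(len(param) - 1):
--         if not black:
--             if param[i] > 0 and param[i - 1] == 0:
--                 lst.append(i)
--                 black = True
--         else:
--             if param[i] == 0 and param[i - 1] > 0:
--                 lst.append(i - 1)
--                 black = False
--     if len(lst) % 2 == 1:
--         lst.append(len(param) - 1)
--     return lst
-- ===== SOURCE B (Python) =====
-- def _merge(rises, falls):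
--     # alternate: next rise, then the matching fall (append fall-1), recurse past it
--     if not rises:
--         return []
--     r = rises[0]
--     falls = [f for f in falls if f > r]
--     if not falls:
--         return [r]
--     f = falls[0]
--     rest = _merge([x for x in rises[1:] if x > f], falls[1:])
--     return [r, f - 1] + rest
--
--
-- def get_black_steps_list(param):
--     n = len(param)
--     if n == 0:
--         return []
--     idxs = range(n - 1)
--     rises = [i for i in idxs if param[i] > 0 and param[i - 1] == 0]
--     falls = [i for i in idxs if param[i] == 0 and param[i - 1] > 0]
--     out = _merge(rises, falls)
--     if len(out) % 2 == 1:
--         out.append(n - 1)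
--     return out
-- ===== Notes on version B (the rewrite author's own statement) =====
-- stated objective: alternative
-- what changed: A's single stateful scan with a 'black' flag is replaced by two comprehension passes collecting rise and fall indices plus an alternating recursive pointer-merge of the two lists.
import Mathlib
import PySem

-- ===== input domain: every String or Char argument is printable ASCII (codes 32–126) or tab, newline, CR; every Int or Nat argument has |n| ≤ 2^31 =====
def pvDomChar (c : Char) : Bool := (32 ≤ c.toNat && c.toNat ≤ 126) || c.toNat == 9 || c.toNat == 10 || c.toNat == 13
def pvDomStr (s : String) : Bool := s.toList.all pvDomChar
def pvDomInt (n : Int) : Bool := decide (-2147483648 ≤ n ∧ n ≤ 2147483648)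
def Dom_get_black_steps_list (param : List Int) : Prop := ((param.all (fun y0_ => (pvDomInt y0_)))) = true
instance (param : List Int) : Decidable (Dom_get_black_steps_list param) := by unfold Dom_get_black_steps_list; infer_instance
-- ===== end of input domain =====

-- B replaces A's single stateful scan by two comprehension passes (rise/fall indices)
-- plus an alternating pointer-merge; same result, different decomposition (objective: alternative).

-- ===== PORT A =====
-- Indexing note: inside the loop 0 ≤ i ≤ len-2 and -1 ≤ i-1, with len ≥ 1, so both
-- param[i] and param[i-1] are always in range (Python's negative wraparound included):
-- pyGetD with default 0 is exact here (the default is never taken).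
def get_black_steps_list (param : List Int) : List Int :=
  let lst : List Int := []
  if param.length == 0 then lst
  else
    let st := (PySem.List.pyRange 0 ((param.length : Int) - 1) 1).foldl
      (fun (st : List Int × Bool) i =>
        if !st.2 then
          if PySem.List.pyGetD param i 0 > 0 ∧ PySem.List.pyGetD param (i-1) 0 = 0 then
            (st.1 ++ [i], true)
          else st
        else
          if PySem.List.pyGetD param i 0 = 0 ∧ PySem.List.pyGetD param (i-1) 0 > 0 then
            (st.1 ++ [i-1], false)
          else st)
      (lst, false)
    let lst := st.1
    if lst.length % 2 == 1 then lst ++ [(param.length : Int) - 1] else lst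

-- ===== PORT B =====
-- Source B's _merge: next rise, then the matching fall (append fall-1), recurse past it.
def mergeBF (rises falls : List Int) : List Int :=
  match rises with
  | [] => []
  | r :: rs =>
    match falls.filter (fun f => decide (r < f)) with
    | [] => [r]
    | f :: fs => r :: (f - 1) :: mergeBF (rs.filter (fun x => decide (f < x))) fs
termination_by rises.length
decreasing_by
  simp only [List.length_unattach]
  exact Nat.lt_succ_of_le (le_trans (List.length_filter_le _ _) (by simp))

def get_black_steps_list_alt (param : List Int) : List Int :=
  let n : Int := param.length
  if n == 0 then []
  else
    let idxs := PySem.List.pyRange 0 (n - 1) 1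
    let rises := idxs.filter
      (fun i => decide (PySem.List.pyGetD param i 0 > 0 ∧ PySem.List.pyGetD param (i-1) 0 = 0))
    let falls := idxs.filter
      (fun i => decide (PySem.List.pyGetD param i 0 = 0 ∧ PySem.List.pyGetD param (i-1) 0 > 0))
    let out := mergeBF rises falls
    if out.length % 2 == 1 then out ++ [n - 1] else out

-- ===== PRECONDITION & SPEC =====
def Spec_get_black_steps_list (param : List Int) (out : List Int) : Prop := out = get_black_steps_list_alt param
instance (param : List Int) (out : List Int) : Decidable (Spec_get_black_steps_list param out) := by unfold Spec_get_black_steps_list; infer_instance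

-- ===== CLAIM (what is proved, stated in full; the proofs are below) =====
def Claim_equal_get_black_steps_list : Prop := ∀ (param : List Int), Dom_get_black_steps_list param → Spec_get_black_steps_list param (get_black_steps_list param)

-- ===== LEMMAS AND PROOFS =====

-- A's loop as a structural recursion on the index list (state = the Bool 'black').
def loopA (param : List Int) : List Int → Bool → List Int
  | [], _ => []
  | i :: is, false =>
      if PySem.List.pyGetD param i 0 > 0 ∧ PySem.List.pyGetD param (i-1) 0 = 0 then
        i :: loopA param is true
      else loopA param is false
  | i :: is, true =>
      if PySem.List.pyGetD param i 0 = 0 ∧ PySem.List.pyGetD param (i-1) 0 > 0 then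
        (i-1) :: loopA param is false
      else loopA param is true

-- the 'inside a black run' residual of mergeBF
def mergeT (rises falls : List Int) : List Int :=
  match falls with
  | [] => []
  | f :: fs => (f - 1) :: mergeBF (rises.filter (fun x => decide (f < x))) fs

def stepA (param : List Int) (st : List Int × Bool) (i : Int) : List Int × Bool :=
  if !st.2 then
    if PySem.List.pyGetD param i 0 > 0 ∧ PySem.List.pyGetD param (i-1) 0 = 0 then
      (st.1 ++ [i], true)
    else st
  else
    if PySem.List.pyGetD param i 0 = 0 ∧ PySem.List.pyGetD param (i-1) 0 > 0 then
      (st.1 ++ [i-1], false)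
    else st

lemma foldA_eq' (param : List Int) : ∀ (L lst : List Int) (b : Bool),
    (L.foldl (stepA param) (lst, b)).1 = lst ++ loopA param L b := by
  intro L
  induction L with
  | nil => intro lst b; simp [loopA]
  | cons i L ih =>
    intro lst b
    rw [List.foldl_cons]
    cases b with
    | false =>
      by_cases h : PySem.List.pyGetD param i 0 > 0 ∧ PySem.List.pyGetD param (i-1) 0 = 0
      · rw [show stepA param (lst, false) i = (lst ++ [i], true) from by simp [stepA, h], ih]
        simp [loopA, h]
      · rw [show stepA param (lst, false) i = (lst, false) from by simp [stepA, h], ih]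
        simp [loopA, h]
    | true =>
      by_cases h : PySem.List.pyGetD param i 0 = 0 ∧ PySem.List.pyGetD param (i-1) 0 > 0
      · rw [show stepA param (lst, true) i = (lst ++ [i-1], false) from by simp [stepA, h], ih]
        simp [loopA, h]
      · rw [show stepA param (lst, true) i = (lst, true) from by simp [stepA, h], ih]
        simp [loopA, h]

lemma foldA_eq (param : List Int) : ∀ (L lst : List Int) (b : Bool),
    (L.foldl (fun (st : List Int × Bool) i =>
        if !st.2 then
          if PySem.List.pyGetD param i 0 > 0 ∧ PySem.List.pyGetD param (i-1) 0 = 0 then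
            (st.1 ++ [i], true)
          else st
        else
          if PySem.List.pyGetD param i 0 = 0 ∧ PySem.List.pyGetD param (i-1) 0 > 0 then
            (st.1 ++ [i-1], false)
          else st)
      (lst, b)).1 = lst ++ loopA param L b := by
  intro L lst b
  have hfun : (fun (st : List Int × Bool) i =>
        if !st.2 then
          if PySem.List.pyGetD param i 0 > 0 ∧ PySem.List.pyGetD param (i-1) 0 = 0 then
            (st.1 ++ [i], true)
          else st
        else
          if PySem.List.pyGetD param i 0 = 0 ∧ PySem.List.pyGetD param (i-1) 0 > 0 then
            (st.1 ++ [i-1], false)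
          else st) = stepA param := rfl
  rw [hfun]
  exact foldA_eq' param L lst b

lemma mergeBF_cons (r : Int) (rs falls : List Int) :
    mergeBF (r :: rs) falls = r :: mergeT rs (falls.filter (fun f => decide (r < f))) := by
  unfold mergeBF mergeT
  cases h : falls.filter (fun f => decide (r < f)) <;> simp

lemma mergeBF_drop_fall (rises : List Int) (i : Int) (falls : List Int)
    (h : ∀ r ∈ rises, i < r) :
    mergeBF rises (i :: falls) = mergeBF rises falls := by
  cases rises with
  | nil => simp [mergeBF]
  | cons r rs =>
    have hri : ¬ (r < i) := by have := h r (by simp); omega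
    rw [mergeBF_cons, mergeBF_cons]
    simp [hri]

lemma mergeT_drop_rise (i : Int) (rises falls : List Int)
    (h : ∀ f ∈ falls, i < f) :
    mergeT (i :: rises) falls = mergeT rises falls := by
  cases falls with
  | nil => rfl
  | cons f fs =>
    have hfi : ¬ (f < i) := by have := h f (by simp); omega
    unfold mergeT
    simp [hfi]

lemma loopA_eq_merge (param : List Int) : ∀ (L : List Int), L.Pairwise (· < ·) →
    loopA param L false =
      mergeBF
        (L.filter (fun i => decide (PySem.List.pyGetD param i 0 > 0 ∧ PySem.List.pyGetD param (i-1) 0 = 0)))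
        (L.filter (fun i => decide (PySem.List.pyGetD param i 0 = 0 ∧ PySem.List.pyGetD param (i-1) 0 > 0)))
    ∧ loopA param L true =
      mergeT
        (L.filter (fun i => decide (PySem.List.pyGetD param i 0 > 0 ∧ PySem.List.pyGetD param (i-1) 0 = 0)))
        (L.filter (fun i => decide (PySem.List.pyGetD param i 0 = 0 ∧ PySem.List.pyGetD param (i-1) 0 > 0))) := by
  intro L
  induction L with
  | nil => intro _; constructor <;> simp [loopA, mergeBF, mergeT]
  | cons i L ih =>
    intro hp
    have hlt : ∀ x ∈ L, i < x := (List.pairwise_cons.mp hp).1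
    obtain ⟨ihF, ihT⟩ := ih (List.pairwise_cons.mp hp).2
    have memR : ∀ x ∈ L.filter (fun i => decide (PySem.List.pyGetD param i 0 > 0 ∧ PySem.List.pyGetD param (i-1) 0 = 0)), i < x := by
      intro x hx; exact hlt x (List.mem_of_mem_filter hx)
    have memF : ∀ x ∈ L.filter (fun i => decide (PySem.List.pyGetD param i 0 = 0 ∧ PySem.List.pyGetD param (i-1) 0 > 0)), i < x := by
      intro x hx; exact hlt x (List.mem_of_mem_filter hx)
    constructor
    · -- false state
      by_cases hR : PySem.List.pyGetD param i 0 > 0 ∧ PySem.List.pyGetD param (i-1) 0 = 0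
      · have hnF : ¬ (PySem.List.pyGetD param i 0 = 0 ∧ PySem.List.pyGetD param (i-1) 0 > 0) := by
          omega
        simp only [loopA, List.filter_cons, decide_eq_true_eq]
        rw [if_pos hR, if_pos hR, if_neg hnF, mergeBF_cons,
          List.filter_eq_self.mpr (fun x hx => decide_eq_true (memF x hx))]
        exact congrArg _ ihT
      · by_cases hF : PySem.List.pyGetD param i 0 = 0 ∧ PySem.List.pyGetD param (i-1) 0 > 0
        · simp only [loopA, List.filter_cons, decide_eq_true_eq]
          rw [if_neg hR, if_neg hR, if_pos hF, mergeBF_drop_fall _ _ _ memR]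
          exact ihF
        · simp only [loopA, List.filter_cons, decide_eq_true_eq]
          rw [if_neg hR, if_neg hR, if_neg hF]
          exact ihF
    · -- true state
      by_cases hF : PySem.List.pyGetD param i 0 = 0 ∧ PySem.List.pyGetD param (i-1) 0 > 0
      · have hnR : ¬ (PySem.List.pyGetD param i 0 > 0 ∧ PySem.List.pyGetD param (i-1) 0 = 0) := by
          omega
        simp only [loopA, List.filter_cons, decide_eq_true_eq]
        rw [if_pos hF, if_neg hnR, if_pos hF]
        simp only [mergeT]
        rw [List.filter_eq_self.mpr (fun x hx => decide_eq_true (memR x hx))]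
        exact congrArg _ ihF
      · by_cases hR : PySem.List.pyGetD param i 0 > 0 ∧ PySem.List.pyGetD param (i-1) 0 = 0
        · simp only [loopA, List.filter_cons, decide_eq_true_eq]
          rw [if_neg hF, if_pos hR, if_neg hF, mergeT_drop_rise _ _ _ memF]
          exact ihT
        · simp only [loopA, List.filter_cons, decide_eq_true_eq]
          rw [if_neg hF, if_neg hR, if_neg hF]
          exact ihT

-- ===== VERDICT (by name: the statement is the Claim_ definition above) =====
theorem get_black_steps_list_spec : Claim_equal_get_black_steps_list := by
  unfold Claim_equal_get_black_steps_list
  intro param _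
  unfold Spec_get_black_steps_list get_black_steps_list get_black_steps_list_alt
  by_cases hnil : param.length = 0
  · simp [hnil]
  · have h0 : (param.length == 0) = false := by simpa using hnil
    have h0' : ((param.length : Int) == 0) = false := by
      simp only [beq_eq_false_iff_ne, ne_eq]
      exact_mod_cast hnil
    simp only [h0, h0', Bool.false_eq_true, if_false]
    rw [foldA_eq param _ [] false]
    rw [(loopA_eq_merge param _ (PySem.List.pairwise_lt_pyRange_one 0 _ )).1]
    simp
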